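-- pv_equiv track=rewrite | github.com/Andracarys/Coding-Tasks | CS50/cs50_5.py | rule4
-- ===== SOURCE A (Python) =====
-- def rule4(s):
--     found_number = False
--
--     for char in s:
--         if char.isdigit():
--             if not found_number:
--                 if char == '0':
--                     return False  # First number can't be '0'
--                 found_number = True
--         elif found_number:
--             return False  # A letter was found after a number
--
--     return True  # If the loop finishes, the rule passes
-- ===== SOURCE B (Python) =====
-- def rule4(s):
--     i = 0
--     while i < len(s) and not s[i].isdigit():
--         i += 1
--     if i == len(s):
--         return True
--     if s[i] == '0':
--         return False
--     return all(c.isdigit() for c in s[i:])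
-- ===== Notes on version B (the rewrite author's own statement) =====
-- stated objective: simpler
-- what changed: Replaces A's single flag-driven pass with a two-phase check: skip leading non-digits to the first digit, then reject a zero first digit and require the whole remaining tail to be digits via all().
import Mathlib
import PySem

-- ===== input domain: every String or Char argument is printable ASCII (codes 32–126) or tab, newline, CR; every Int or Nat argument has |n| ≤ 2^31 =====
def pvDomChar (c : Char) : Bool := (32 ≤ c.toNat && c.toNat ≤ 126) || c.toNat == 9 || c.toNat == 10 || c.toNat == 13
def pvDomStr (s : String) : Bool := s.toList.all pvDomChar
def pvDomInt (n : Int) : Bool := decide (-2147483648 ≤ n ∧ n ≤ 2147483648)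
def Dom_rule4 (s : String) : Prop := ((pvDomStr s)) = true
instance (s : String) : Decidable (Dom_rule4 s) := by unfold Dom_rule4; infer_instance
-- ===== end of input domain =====

-- B replaces A's flag-driven single pass with a two-phase scan (skip to first digit, then check the tail); objective: simpler decomposition.

-- ===== PORT A =====
-- loop over the characters carrying the found_number flag; early returns become result values
def rule4Loop : List Char → Bool → Bool
  | [], _ => true
  | c :: rest, found =>
    if PySem.Chars.isdigit c then
      if !found then
        (if c = '0' then false else rule4Loop rest true)
      else rule4Loop rest found
    else if found then false
    else rule4Loop rest found

def rule4 (s : String) : Bool := rule4Loop s.toList false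

-- ===== PORT B =====
-- phase 1: advance past the leading non-digits; phase 2: reject '0', then all(...isdigit)
def rule4_alt (s : String) : Bool :=
  match s.toList.dropWhile (fun c => !PySem.Chars.isdigit c) with
  | [] => true
  | c :: tail => if c = '0' then false else (c :: tail).all PySem.Chars.isdigit

-- ===== PRECONDITION & SPEC =====
def Spec_rule4 (s : String) (out : Bool) : Prop := out = rule4_alt s
instance (s : String) (out : Bool) : Decidable (Spec_rule4 s out) := by unfold Spec_rule4; infer_instance

-- ===== CLAIM (what is proved, stated in full; the proofs are below) =====
def Claim_equal_rule4 : Prop := ∀ (s : String), Dom_rule4 s → Spec_rule4 s (rule4 s)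

-- ===== LEMMAS AND PROOFS =====

-- once the flag is set, A just checks that every remaining character is a digit
theorem rule4Loop_true (cs : List Char) : rule4Loop cs true = cs.all PySem.Chars.isdigit := by
  induction cs with
  | nil => rfl
  | cons c rest ih =>
    simp only [rule4Loop, List.all_cons]
    by_cases h : PySem.Chars.isdigit c = true <;> simp [h, ih]

theorem rule4Loop_false (cs : List Char) :
    rule4Loop cs false =
      (match cs.dropWhile (fun c => !PySem.Chars.isdigit c) with
       | [] => true
       | c :: tail => if c = '0' then false else (c :: tail).all PySem.Chars.isdigit) := by
  induction cs with
  | nil => rfl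
  | cons c rest ih =>
    by_cases h : PySem.Chars.isdigit c = true
    · simp only [rule4Loop, h, List.dropWhile_cons, if_true, Bool.not_eq_true']
      by_cases h0 : c = '0' <;> simp [h0, h, rule4Loop_true]
    · simp only [rule4Loop, List.dropWhile_cons, Bool.not_eq_true'] at *
      simp [h, ih]

-- ===== VERDICT (by name: the statement is the Claim_ definition above) =====
theorem rule4_spec : Claim_equal_rule4 := by
  intro s _
  unfold Spec_rule4 rule4 rule4_alt
  exact rule4Loop_false s.toList
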